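-- pv_equiv track=rewrite | github.com/ariffazil/openclaw-workspace | arifos_aaa_mcp/server.py | _fold_verdict
-- ===== SOURCE A (Python) =====
-- def _fold_verdict(verdicts: list[str]) -> str:
--     if any(v.upper() == "VOID" for v in verdicts):
--         return "VOID"
--     if any(v.upper() in {"SABAR", "888_HOLD"} for v in verdicts):
--         return "SABAR"
--     if any(v.upper() == "PARTIAL" for v in verdicts):
--         return "PARTIAL"
--     return "SEAL"
-- ===== SOURCE B (Python) =====
-- _PRIO = {"VOID": 0, "SABAR": 1, "888_HOLD": 1, "PARTIAL": 2}
-- _LABELS = ("VOID", "SABAR", "PARTIAL", "SEAL")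
--
--
-- def _fold_verdict(verdicts: list[str]) -> str:
--     best = 3
--     for v in verdicts:
--         best = min(best, _PRIO.get(v.upper(), 3))
--     return _LABELS[best]
-- ===== Notes on version B (the rewrite author's own statement) =====
-- stated objective: alternative
-- what changed: Replaced three short-circuiting any() scans with a single pass computing the minimum priority rank via a lookup table, then mapping the rank back to its label.
import Mathlib
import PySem

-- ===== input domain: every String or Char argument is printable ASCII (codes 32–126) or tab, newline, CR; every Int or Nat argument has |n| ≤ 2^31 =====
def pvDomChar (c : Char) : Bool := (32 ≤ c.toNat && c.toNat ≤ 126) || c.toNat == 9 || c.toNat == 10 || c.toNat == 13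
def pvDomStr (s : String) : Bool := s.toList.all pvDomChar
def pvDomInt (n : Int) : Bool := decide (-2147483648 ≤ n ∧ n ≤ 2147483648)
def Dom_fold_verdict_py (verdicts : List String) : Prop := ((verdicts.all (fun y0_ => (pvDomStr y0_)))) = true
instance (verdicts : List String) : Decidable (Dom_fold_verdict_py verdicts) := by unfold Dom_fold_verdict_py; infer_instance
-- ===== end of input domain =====

-- B changes the decomposition: one table-driven min-rank pass instead of A's three any() scans.

-- ===== PORT A =====
def fold_verdict_py (verdicts : List String) : String :=
  if verdicts.any (fun v => PySem.Str.upper v == "VOID") then "VOID"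
  else if verdicts.any (fun v => PySem.Str.upper v == "SABAR" || PySem.Str.upper v == "888_HOLD") then "SABAR"
  else if verdicts.any (fun v => PySem.Str.upper v == "PARTIAL") then "PARTIAL"
  else "SEAL"

-- ===== PORT B =====
def pvPrio : PySem.Dict String Nat :=
  PySem.Dict.ofList [("VOID", 0), ("SABAR", 1), ("888_HOLD", 1), ("PARTIAL", 2)]

def pvLabels : List String := ["VOID", "SABAR", "PARTIAL", "SEAL"]

def pvRank (v : String) : Nat := PySem.Dict.getD pvPrio (PySem.Str.upper v) 3

def fold_verdict_py_alt (verdicts : List String) : String :=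
  let best := verdicts.foldl (fun b v => min b (pvRank v)) 3
  pvLabels.getD best "SEAL"

-- ===== PRECONDITION & SPEC =====
def Spec_fold_verdict_py (verdicts : List String) (out : String) : Prop := out = fold_verdict_py_alt verdicts
instance (verdicts : List String) (out : String) : Decidable (Spec_fold_verdict_py verdicts out) := by unfold Spec_fold_verdict_py; infer_instance

-- ===== CLAIM (what is proved, stated in full; the proofs are below) =====
def Claim_equal_fold_verdict_py : Prop := ∀ (verdicts : List String), Dom_fold_verdict_py verdicts → Spec_fold_verdict_py verdicts (fold_verdict_py verdicts)

-- ===== LEMMAS AND PROOFS =====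

theorem pvPrio_eq : pvPrio = PySem.Dict.mk [("VOID", 0), ("SABAR", 1), ("888_HOLD", 1), ("PARTIAL", 2)] := by
  decide

theorem pvRank_eq (v : String) :
    pvRank v =
      (if PySem.Str.upper v = "VOID" then 0
       else if PySem.Str.upper v = "SABAR" then 1
       else if PySem.Str.upper v = "888_HOLD" then 1
       else if PySem.Str.upper v = "PARTIAL" then 2 else 3) := by
  rw [pvRank, pvPrio_eq]
  simp only [PySem.Dict.getD, PySem.Dict.get?_mk_cons, beq_iff_eq]
  by_cases h1 : PySem.Str.upper v = "VOID"
  · simp [h1]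
  · by_cases h2 : PySem.Str.upper v = "SABAR"
    · simp [h2]
    · by_cases h3 : PySem.Str.upper v = "888_HOLD"
      · simp [h3]
      · by_cases h4 : PySem.Str.upper v = "PARTIAL"
        · simp [h4]
        · simp [h1, h2, h3, h4, Ne.symm h1, Ne.symm h2, Ne.symm h3, Ne.symm h4, PySem.Dict.get?]

theorem pvRank_le_zero_iff (v : String) : pvRank v ≤ 0 ↔ PySem.Str.upper v = "VOID" := by
  rw [pvRank_eq]; split_ifs <;> simp_all

theorem pvRank_le_one_iff (v : String) :
    pvRank v ≤ 1 ↔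
      (PySem.Str.upper v = "VOID" ∨ PySem.Str.upper v = "SABAR" ∨ PySem.Str.upper v = "888_HOLD") := by
  rw [pvRank_eq]; split_ifs <;> simp_all

theorem pvRank_le_two_iff (v : String) :
    pvRank v ≤ 2 ↔
      (PySem.Str.upper v = "VOID" ∨ PySem.Str.upper v = "SABAR" ∨ PySem.Str.upper v = "888_HOLD"
        ∨ PySem.Str.upper v = "PARTIAL") := by
  rw [pvRank_eq]; split_ifs <;> simp_all

theorem pvFoldlMin_le_iff (vs : List String) (a k : Nat) :
    vs.foldl (fun b v => min b (pvRank v)) a ≤ k ↔ a ≤ k ∨ ∃ v ∈ vs, pvRank v ≤ k := by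
  induction vs generalizing a with
  | nil => simp
  | cons x t ih =>
      rw [List.foldl_cons, ih, min_le_iff]
      constructor
      · rintro ((h | h) | ⟨v, hv, hr⟩)
        · exact Or.inl h
        · exact Or.inr ⟨x, List.mem_cons_self, h⟩
        · exact Or.inr ⟨v, List.mem_cons_of_mem _ hv, hr⟩
      · rintro (h | ⟨v, hv, hr⟩)
        · exact Or.inl (Or.inl h)
        · rcases List.mem_cons.mp hv with rfl | hv
          · exact Or.inl (Or.inr hr)
          · exact Or.inr ⟨v, hv, hr⟩

-- ===== VERDICT (by name: the statement is the Claim_ definition above) =====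
theorem fold_verdict_py_spec : Claim_equal_fold_verdict_py := by
  intro vs _
  show fold_verdict_py vs = fold_verdict_py_alt vs
  unfold fold_verdict_py fold_verdict_py_alt
  simp only []
  set m := vs.foldl (fun b v => min b (pvRank v)) 3 with hm
  have h3 : m ≤ 3 := by rw [hm, pvFoldlMin_le_iff]; exact Or.inl le_rfl
  by_cases c0 : ∃ v ∈ vs, PySem.Str.upper v = "VOID"
  · have hm0 : m = 0 := by
      have : m ≤ 0 := by
        rw [hm, pvFoldlMin_le_iff]
        obtain ⟨v, hv, hu⟩ := c0
        exact Or.inr ⟨v, hv, (pvRank_le_zero_iff v).mpr hu⟩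
      omega
    rw [if_pos (by simpa using c0), hm0]
    rfl
  · rw [if_neg (by simpa using c0)]
    by_cases c1 : ∃ v ∈ vs, PySem.Str.upper v = "SABAR" ∨ PySem.Str.upper v = "888_HOLD"
    · have hm1 : m = 1 := by
        have hle : m ≤ 1 := by
          rw [hm, pvFoldlMin_le_iff]
          obtain ⟨v, hv, hu⟩ := c1
          exact Or.inr ⟨v, hv, (pvRank_le_one_iff v).mpr (Or.inr hu)⟩
        have hgt : ¬ m ≤ 0 := by
          rw [hm, pvFoldlMin_le_iff]
          rintro (h | ⟨v, hv, hr⟩)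
          · omega
          · exact c0 ⟨v, hv, (pvRank_le_zero_iff v).mp hr⟩
        omega
      rw [if_pos (by simpa using c1), hm1]
      rfl
    · rw [if_neg (by simpa using c1)]
      by_cases c2 : ∃ v ∈ vs, PySem.Str.upper v = "PARTIAL"
      · have hm2 : m = 2 := by
          have hle : m ≤ 2 := by
            rw [hm, pvFoldlMin_le_iff]
            obtain ⟨v, hv, hu⟩ := c2
            exact Or.inr ⟨v, hv, (pvRank_le_two_iff v).mpr (Or.inr (Or.inr (Or.inr hu)))⟩
          have hgt : ¬ m ≤ 1 := by
            rw [hm, pvFoldlMin_le_iff]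
            rintro (h | ⟨v, hv, hr⟩)
            · omega
            · rcases (pvRank_le_one_iff v).mp hr with h0 | h1
              · exact c0 ⟨v, hv, h0⟩
              · exact c1 ⟨v, hv, h1⟩
          omega
        rw [if_pos (by simpa using c2), hm2]
        rfl
      · have hm3 : m = 3 := by
          have hgt : ¬ m ≤ 2 := by
            rw [hm, pvFoldlMin_le_iff]
            rintro (h | ⟨v, hv, hr⟩)
            · omega
            · rcases (pvRank_le_two_iff v).mp hr with h0 | h1 | h1 | h2
              · exact c0 ⟨v, hv, h0⟩
              · exact c1 ⟨v, hv, Or.inl h1⟩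
              · exact c1 ⟨v, hv, Or.inr h1⟩
              · exact c2 ⟨v, hv, h2⟩
          omega
        rw [if_neg (by simpa using c2), hm3]
        rfl
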